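-- pv_equiv track=rewrite | github.com/shiftshapr/agent-lab | projects/monuments/bride_of_charlie/scripts/report_transcript_raw_vs_corrected_deltas.py | by_timestamp
-- ===== SOURCE A (Python) =====
-- from collections import defaultdict
--
-- def by_timestamp(lines: list[tuple[int, str, int]]) -> dict[int, tuple[str, int, int]]:
--     """ts_sec -> (joined bodies with space, first_lineno, last_lineno)."""
--     groups: dict[int, list[tuple[int, str]]] = defaultdict(list)
--     for ts_sec, body, lineno in lines:
--         groups[ts_sec].append((lineno, body))
--     out: dict[int, tuple[str, int, int]] = {}
--     for ts_sec, pairs in groups.items():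
--         pairs.sort(key=lambda x: x[0])
--         first_ln = pairs[0][0]
--         last_ln = pairs[-1][0]
--         joined = " ".join(b for _, b in pairs)
--         out[ts_sec] = (joined, first_ln, last_ln)
--     return out
-- ===== SOURCE B (Python) =====
-- def by_timestamp(lines: list[tuple[int, str, int]]) -> dict[int, tuple[str, int, int]]:
--     """ts_sec -> (joined bodies with space, first_lineno, last_lineno)."""
--     # One global stable sort by lineno, then a single linear aggregation pass.
--     agg: dict[int, tuple[str, int, int]] = {}
--     for ts_sec, body, lineno in sorted(lines, key=lambda t: t[2]):
--         if ts_sec in agg: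
--             joined, first_ln, _ = agg[ts_sec]
--             agg[ts_sec] = (joined + " " + body, first_ln, lineno)
--         else:
--             agg[ts_sec] = (body, lineno, lineno)
--     # Emit keys in first-appearance order of the input, as the grouping dict would.
--     out: dict[int, tuple[str, int, int]] = {}
--     for ts_sec, _, _ in lines:
--         if ts_sec not in out:
--             out[ts_sec] = agg[ts_sec]
--     return out
-- ===== Notes on version B (the rewrite author's own statement) =====
-- stated objective: alternative
-- what changed: Instead of grouping lines into per-timestamp lists and sorting each group by lineno, B performs one global stable sort of the whole input by lineno, aggregates each timestamp's joined body / first / last lineno in a single linear pass over the sorted list, and then emits keys in first-appearance order.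
import Mathlib
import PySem

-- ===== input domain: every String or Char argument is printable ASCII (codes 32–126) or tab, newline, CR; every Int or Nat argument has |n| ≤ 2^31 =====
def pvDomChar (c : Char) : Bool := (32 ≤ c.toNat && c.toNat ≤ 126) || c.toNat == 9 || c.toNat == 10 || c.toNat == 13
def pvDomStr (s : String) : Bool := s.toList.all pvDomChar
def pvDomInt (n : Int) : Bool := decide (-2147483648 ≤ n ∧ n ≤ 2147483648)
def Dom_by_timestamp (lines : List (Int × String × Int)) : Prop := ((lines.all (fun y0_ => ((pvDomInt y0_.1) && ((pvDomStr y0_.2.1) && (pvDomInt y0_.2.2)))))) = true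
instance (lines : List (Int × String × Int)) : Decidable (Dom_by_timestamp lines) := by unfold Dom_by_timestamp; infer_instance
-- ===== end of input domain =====

-- B replaces A's per-timestamp sorts over a grouping dict by ONE global stable sort by lineno
-- followed by a single linear aggregation pass (alternative decomposition; return value proved equal).

-- ===== PORT A =====
def by_timestamp (lines : List (Int × String × Int)) : List (Int × String × Int × Int) :=
  let groups : PySem.Dict Int (List (Int × String)) :=
    lines.foldl (fun d t => d.modify t.1 [] (fun l => l ++ [(t.2.2, t.2.1)])) PySem.Dict.empty
  let out : PySem.Dict Int (String × Int × Int) :=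
    groups.items.foldl (fun o p =>
      let pairs := PySem.List.sorted p.2 (fun x => x.1)
      -- pairs[0] / pairs[-1]: every group is nonempty, so the defaults are unreachable
      let first_ln := (PySem.List.pyGetD pairs 0 (0, "")).1
      let last_ln := (PySem.List.pyGetD pairs (-1) (0, "")).1
      let joined := PySem.Str.join " " (pairs.map (fun x => x.2))
      o.insert p.1 (joined, first_ln, last_ln)) PySem.Dict.empty
  out.items

-- ===== PORT B =====
def by_timestamp_alt (lines : List (Int × String × Int)) : List (Int × String × Int × Int) :=
  let srt := PySem.List.sorted lines (fun t => t.2.2)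
  let agg : PySem.Dict Int (String × Int × Int) :=
    srt.foldl (fun d t =>
      if d.contains t.1 then
        let v := d.getD t.1 ("", 0, 0)
        d.insert t.1 (v.1 ++ " " ++ t.2.1, v.2.1, t.2.2)
      else
        d.insert t.1 (t.2.1, t.2.2, t.2.2)) PySem.Dict.empty
  let out : PySem.Dict Int (String × Int × Int) :=
    lines.foldl (fun o t => if o.contains t.1 then o else o.insert t.1 (agg.getD t.1 ("", 0, 0)))
      PySem.Dict.empty
  out.items

-- ===== PRECONDITION & SPEC =====
def Spec_by_timestamp (lines : List (Int × String × Int)) (out : List (Int × String × Int × Int)) : Prop := out = by_timestamp_alt lines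
instance (lines : List (Int × String × Int)) (out : List (Int × String × Int × Int)) : Decidable (Spec_by_timestamp lines out) := by unfold Spec_by_timestamp; infer_instance

-- ===== CLAIM (what is proved, stated in full; the proofs are below) =====
def Claim_equal_by_timestamp : Prop := ∀ (lines : List (Int × String × Int)), Dom_by_timestamp lines → Spec_by_timestamp lines (by_timestamp lines)

-- ===== LEMMAS AND PROOFS =====

theorem pv_insertBy_all_lt {α κ : Type} [LinearOrder κ] (key : α → κ) (x : α) (l : List α)
    (h : ∀ z ∈ l, key x < key z) :
    PySem.List.insertBy (fun a b => decide (key a < key b)) x l = x :: l := by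
  cases l with
  | nil => rfl
  | cons y ys => simp [PySem.List.insertBy, h y (by simp)]

theorem pv_filter_insertBy {α κ : Type} [LinearOrder κ] (key : α → κ) (p : α → Bool) (x : α) :
    ∀ (ys : List α), ys.Pairwise (fun a b => key a ≤ key b) →
    (PySem.List.insertBy (fun a b => decide (key a < key b)) x ys).filter p
      = if p x then PySem.List.insertBy (fun a b => decide (key a < key b)) x (ys.filter p)
        else ys.filter p := by
  intro ys
  induction ys with
  | nil => intro _; cases hp : p x <;> simp [PySem.List.insertBy, hp]
  | cons y ys ih =>
    intro hpw
    rw [List.pairwise_cons] at hpw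
    obtain ⟨hy, hpw'⟩ := hpw
    by_cases hlt : key x < key y
    · -- insertBy x (y::ys) = x :: y :: ys
      have h1 : PySem.List.insertBy (fun a b => decide (key a < key b)) x (y :: ys) = x :: y :: ys := by
        simp [PySem.List.insertBy, hlt]
      rw [h1]
      cases hp : p x with
      | false => simp [List.filter_cons, hp]
      | true =>
        have hall : ∀ z ∈ (y :: ys).filter p, key x < key z := by
          intro z hz
          have hz' := List.mem_of_mem_filter hz
          rcases hz' with _ | hz'
          · exact hlt
          · exact lt_of_lt_of_le hlt (hy z (by assumption))
        rw [pv_insertBy_all_lt key x _ hall]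
        simp [List.filter_cons, hp]
    · -- insertBy x (y::ys) = y :: insertBy x ys
      have h1 : PySem.List.insertBy (fun a b => decide (key a < key b)) x (y :: ys)
          = y :: PySem.List.insertBy (fun a b => decide (key a < key b)) x ys := by
        simp [PySem.List.insertBy, hlt]
      rw [h1]
      cases hp : p x with
      | false =>
        cases hpy : p y <;> simp [hp, hpy, ih hpw']
      | true =>
        cases hpy : p y with
        | false => simp [hpy, ih hpw', hp]
        | true =>
          have h2 : PySem.List.insertBy (fun a b => decide (key a < key b)) x (y :: ys.filter p)
              = y :: PySem.List.insertBy (fun a b => decide (key a < key b)) x (ys.filter p) := by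
            simp [PySem.List.insertBy, hlt]
          simp [hpy, ih hpw', hp, h2]

theorem pv_sorted_filter {α κ : Type} [LinearOrder κ] (key : α → κ) (p : α → Bool) (xs : List α) :
    (PySem.List.sorted xs key).filter p = PySem.List.sorted (xs.filter p) key := by
  rw [PySem.List.sorted_eq_foldl_insertBy, PySem.List.sorted_eq_foldl_insertBy]
  suffices h : ∀ (l : List α) (acc : List α), acc.Pairwise (fun a b => key a ≤ key b) →
      (l.foldl (fun acc x => PySem.List.insertBy (fun a b => decide (key a < key b)) x acc) acc).filter p
        = (l.filter p).foldl (fun acc x => PySem.List.insertBy (fun a b => decide (key a < key b)) x acc) (acc.filter p) by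
    simpa using h xs [] (by simp)
  intro l
  induction l with
  | nil => intro acc _; rfl
  | cons x l ih =>
    intro acc hacc
    have hacc' : (PySem.List.insertBy (fun a b => decide (key a < key b)) x acc).Pairwise
        (fun a b => key a ≤ key b) := PySem.List.insertBy_pairwise_le key x acc hacc
    cases hp : p x with
    | true =>
      simp [hp, ih _ hacc', pv_filter_insertBy key p x acc hacc]
    | false =>
      simp [hp, ih _ hacc', pv_filter_insertBy key p x acc hacc]

theorem pv_map_insertBy {α β : Type} (g : α → β) (bf : α → α → Bool) (bf' : β → β → Bool)
    (h : ∀ a b, bf' (g a) (g b) = bf a b) (x : α) :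
    ∀ (ys : List α), (PySem.List.insertBy bf x ys).map g
      = PySem.List.insertBy bf' (g x) (ys.map g) := by
  intro ys
  induction ys with
  | nil => rfl
  | cons y ys ih =>
    simp only [PySem.List.insertBy, List.map_cons, h]
    by_cases hb : bf x y = true
    · simp [hb]
    · simp only [Bool.not_eq_true] at hb
      simp [hb, ih]

theorem pv_sorted_map {α β κ : Type} [LinearOrder κ] (g : α → β) (keyb : β → κ) (xs : List α) :
    PySem.List.sorted (xs.map g) keyb = (PySem.List.sorted xs (fun a => keyb (g a))).map g := by
  rw [PySem.List.sorted_eq_foldl_insertBy, PySem.List.sorted_eq_foldl_insertBy]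
  suffices h : ∀ (l : List α) (acc : List α),
      (l.map g).foldl (fun acc x => PySem.List.insertBy (fun a b => decide (keyb a < keyb b)) x acc) (acc.map g)
        = (l.foldl (fun acc x => PySem.List.insertBy (fun a b => decide (keyb (g a) < keyb (g b))) x acc) acc).map g by
    simpa using h xs []
  intro l
  induction l with
  | nil => intro acc; rfl
  | cons x l ih =>
    intro acc
    simp only [List.map_cons, List.foldl_cons]
    rw [← pv_map_insertBy g (fun a b => decide (keyb (g a) < keyb (g b)))
      (fun a b => decide (keyb a < keyb b)) (fun _ _ => rfl) x acc, ih]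

theorem pv_filter_discard {α : Type} [BEq α] [LawfulBEq α] (p : α → Bool) (x : α)
    (hx : p x = false) (s : List α) :
    (PySem.Set.discard s x).filter p = s.filter p := by
  simp only [PySem.Set.discard, List.filter_filter]
  refine List.filter_congr ?_
  intro y _
  by_cases hy : y = x
  · subst hy; simp [hx]
  · simp [hy]

theorem pv_agg_get? (k : Int) :
    ∀ (l : List (Int × String × Int)) (d : PySem.Dict Int (String × Int × Int)),
    (l.foldl (fun d t =>
        if d.contains t.1 then
          d.insert t.1 ((d.getD t.1 ("", 0, 0)).1 ++ " " ++ t.2.1, (d.getD t.1 ("", 0, 0)).2.1, t.2.2)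
        else
          d.insert t.1 (t.2.1, t.2.2, t.2.2)) d).get? k
      = (l.filter (fun t => t.1 == k)).foldl
          (fun ov t => some (match ov with
            | none => (t.2.1, t.2.2, t.2.2)
            | some v => (v.1 ++ " " ++ t.2.1, v.2.1, t.2.2))) (d.get? k) := by
  intro l
  induction l with
  | nil => intro d; rfl
  | cons t l ih =>
    intro d
    simp only [List.foldl_cons, List.filter_cons]
    by_cases hk : t.1 = k
    · subst hk
      simp only [BEq.rfl, if_pos]
      by_cases hc : d.contains t.1 = true
      · -- present: running value extended
        obtain ⟨v, hv⟩ : ∃ v, d.get? t.1 = some v := by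
          rw [PySem.Dict.contains_eq_isSome_get?] at hc
          exact Option.isSome_iff_exists.mp hc
        have hgd : d.getD t.1 ("", 0, 0) = v := PySem.Dict.getD_of_get?_eq_some d _ hv
        rw [if_pos hc, ih]
        simp [PySem.Dict.get?_insert_self, hv, hgd]
      · have hc' : d.contains t.1 = false := by simpa using hc
        have hn : d.get? t.1 = none := by
          rw [PySem.Dict.contains_eq_isSome_get?] at hc'
          simpa using hc'
        rw [if_neg hc, ih]
        simp [PySem.Dict.get?_insert_self, hn]
    · have hbk : (t.1 == k) = false := by simpa using hk
      simp only [hbk, Bool.false_eq_true, if_false]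
      by_cases hc : d.contains t.1 = true
      · rw [if_pos hc, ih, PySem.Dict.get?_insert_of_ne _ _ (fun h => hk h.symm)]
      · rw [if_neg hc, ih, PySem.Dict.get?_insert_of_ne _ _ (fun h => hk h.symm)]

theorem pv_out_items (F : Int → String × Int × Int) :
    ∀ (l : List (Int × String × Int)) (o : PySem.Dict Int (String × Int × Int)), o.keys.Nodup →
    (l.foldl (fun o t => if o.contains t.1 then o else o.insert t.1 (F t.1)) o).items
      = o.items ++ ((PySem.Set.ofList (l.map (fun t => t.1))).filter
          (fun k => !o.contains k)).map (fun k => (k, F k)) := by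
  intro l
  induction l with
  | nil => intro o _; simp [PySem.Set.ofList]
  | cons t l ih =>
    intro o hnd
    simp only [List.foldl_cons, List.map_cons, PySem.Set.ofList_cons]
    by_cases hc : o.contains t.1 = true
    · rw [if_pos hc, ih o hnd]
      have hpt : (!o.contains t.1) = false := by simp [hc]
      simp only [List.filter_cons, hpt, Bool.false_eq_true, if_false]
      rw [pv_filter_discard (fun k => !o.contains k) t.1 hpt]
    · rw [if_neg hc, ih _ (PySem.Dict.nodup_keys_insert o t.1 (F t.1) hnd)]
      have hc' : o.contains t.1 = false := by simpa using hc
      rw [PySem.Dict.items_insert_of_not_contains o _ hc']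
      have hpt : (!o.contains t.1) = true := by simp [hc']
      simp only [List.filter_cons, hpt, if_true, List.map_cons, List.append_assoc,
        List.cons_append, List.nil_append]
      congr 1
      have hfe : ∀ y, (!(o.insert t.1 (F t.1)).contains y)
          = (!o.contains y && !(y == t.1)) := by
        intro y
        rw [PySem.Dict.contains_insert]
        cases hyt : (y == t.1) <;> simp_all
      rw [List.filter_congr (fun y _ => hfe y), ← List.filter_filter]
      rfl

theorem pv_fopt_some :
    ∀ (ts : List (Int × String × Int)) (v : String × Int × Int),
    ts.foldl (fun ov t => some (match ov with
        | none => (t.2.1, t.2.2, t.2.2)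
        | some v => (v.1 ++ " " ++ t.2.1, v.2.1, t.2.2))) (some v)
      = some (ts.foldl (fun v t => (v.1 ++ " " ++ t.2.1, v.2.1, t.2.2)) v) := by
  intro ts
  induction ts with
  | nil => intro v; rfl
  | cons t ts ih => intro v; simp only [List.foldl_cons, ih]

theorem pv_join_foldl :
    ∀ (bs : List String) (b0 : String),
    PySem.Str.join " " (b0 :: bs) = bs.foldl (fun s b => s ++ " " ++ b) b0 := by
  intro bs
  induction bs with
  | nil => intro b0; simp [PySem.Str.join, PySem.Chars.join, List.intercalate]
  | cons b bs ih =>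
    intro b0
    rw [List.foldl_cons, ← ih (b0 ++ " " ++ b)]
    apply String.toList_inj.mp
    simp [PySem.Str.join, PySem.Chars.join, List.intercalate, List.intersperse_cons₂]
    cases bs with
    | nil => simp
    | cons c cs => simp [List.intersperse_cons₂]

theorem pv_last_foldl :
    ∀ (ts : List (Int × String × Int)) (t0 : Int × String × Int),
    ((t0 :: ts).getLast (List.cons_ne_nil _ _)).2.2 = ts.foldl (fun _ t => t.2.2) t0.2.2 := by
  intro ts
  induction ts with
  | nil => intro t0; rfl
  | cons t ts ih => intro t0; simpa [List.getLast_cons] using ih t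

theorem pv_value_eq (lines : List (Int × String × Int)) (k : Int) (hk : k ∈ lines.map (fun t => t.1)) :
    (let pairs := PySem.List.sorted ((lines.filter (fun t => t.1 == k)).map (fun t => (t.2.2, t.2.1)))
        (fun x => x.1)
     (PySem.Str.join " " (pairs.map (fun x => x.2)),
       (PySem.List.pyGetD pairs 0 (0, "")).1, (PySem.List.pyGetD pairs (-1) (0, "")).1))
    = (((PySem.List.sorted lines (fun t => t.2.2)).filter (fun t => t.1 == k)).foldl
          (fun ov t => some (match ov with
            | none => (t.2.1, t.2.2, t.2.2)
            | some v => (v.1 ++ " " ++ t.2.1, v.2.1, t.2.2))) none).getD ("", 0, 0) := by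
  obtain ⟨t, ht, htk⟩ := List.mem_map.mp hk
  have hmem : t ∈ lines.filter (fun t => t.1 == k) := List.mem_filter.mpr ⟨ht, by simp [htk]⟩
  have hne : lines.filter (fun t => t.1 == k) ≠ [] := List.ne_nil_of_mem hmem
  rw [pv_sorted_filter (fun t => t.2.2) (fun t => t.1 == k) lines]
  have hqne : PySem.List.sorted (lines.filter (fun t => t.1 == k)) (fun t => t.2.2) ≠ [] := by
    simpa [PySem.List.sorted_eq_nil_iff] using hne
  obtain ⟨t0, ts, hq⟩ := List.exists_cons_of_ne_nil hqne
  rw [pv_sorted_map (fun t => (t.2.2, t.2.1)) (fun x => x.1) (lines.filter (fun t => t.1 == k))]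
  show (PySem.Str.join " " _, _, _) = _
  rw [show (fun a : Int × String × Int => ((a.2.2, a.2.1) : Int × String).1) = (fun t : Int × String × Int => t.2.2) from rfl]
  rw [hq]
  -- RHS
  rw [List.foldl_cons, pv_fopt_some, Option.getD_some]
  rw [PySem.List.foldl_prod_mk (f := fun s (t : Int × String × Int) => s ++ " " ++ t.2.1)
      (g := fun (p : Int × Int) (t : Int × String × Int) => (p.1, t.2.2))]
  rw [PySem.List.foldl_prod_mk (f := fun (a : Int) (_ : Int × String × Int) => a)
      (g := fun (_ : Int) (t : Int × String × Int) => t.2.2)]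
  rw [PySem.List.foldl_ignore]
  -- LHS components
  refine Prod.ext ?_ (Prod.ext ?_ ?_)
  · show PySem.Str.join " " (((t0 :: ts).map _).map _) = _
    rw [List.map_map, show ((fun x : Int × String => x.2) ∘ fun t : Int × String × Int => (t.2.2, t.2.1)) = (fun t : Int × String × Int => t.2.1) from rfl]
    rw [List.map_cons, pv_join_foldl, List.foldl_map]
  · show (PySem.List.pyGetD (((t0 :: ts)).map _) 0 (0, "")).1 = _
    rw [List.map_cons, PySem.List.pyGetD_zero]
    rfl
  · show (PySem.List.pyGetD (((t0 :: ts)).map _) (-1) (0, "")).1 = _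
    rw [PySem.List.pyGetD_neg_one _ _ (by simp), List.getLast_map]
    rw [show ((fun t : Int × String × Int => ((t.2.2, t.2.1) : Int × String)) ((t0 :: ts).getLast (List.cons_ne_nil _ _))).1
        = ((t0 :: ts).getLast (List.cons_ne_nil _ _)).2.2 from rfl]
    exact pv_last_foldl ts t0

theorem pv_main_eq (lines : List (Int × String × Int)) : by_timestamp lines = by_timestamp_alt lines := by
  simp only [by_timestamp, by_timestamp_alt]
  -- name A's grouping dict
  set groups := lines.foldl (fun d t => d.modify t.1 [] (fun l => l ++ [(t.2.2, t.2.1)])) PySem.Dict.empty with hgroups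
  have hkeys : groups.keys = PySem.Set.ofList (lines.map (fun t => t.1)) := by
    rw [hgroups, PySem.Dict.keys_foldl_modify_key lines (fun t => t.1) []
      (fun d t => (fun l => l ++ [(t.2.2, t.2.1)])) PySem.Dict.empty]
    rw [PySem.Dict.keys_empty, PySem.Set.update_nil_left]
  have hnd : groups.keys.Nodup := by rw [hkeys]; exact PySem.Set.nodup_ofList _
  have hgetD : ∀ c : Int, groups.getD c []
      = (lines.filter (fun t => t.1 == c)).map (fun t => (t.2.2, t.2.1)) := by
    intro c
    rw [hgroups,
      show lines.foldl (fun d t => d.modify t.1 [] (fun l => l ++ [(t.2.2, t.2.1)])) PySem.Dict.empty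
        = (lines.map (fun t => (t.1, (t.2.2, t.2.1)))).foldl
            (fun d p => d.modify p.1 [] (fun l => l ++ [p.2])) PySem.Dict.empty from
        (List.foldl_map (f := fun t : Int × String × Int => (t.1, (t.2.2, t.2.1)))
          (g := fun (d : PySem.Dict Int (List (Int × String))) p => d.modify p.1 [] (fun l => l ++ [p.2]))).symm,
      PySem.Dict.getD_foldl_modify_append]
    rw [List.filter_map, List.map_map]
    simp [PySem.Dict.getD_empty]
    rfl
  have hitems : groups.items
      = groups.keys.map (fun c => (c, groups.getD c [])) := PySem.Dict.items_eq_map_keys groups hnd []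
  -- A's output loop: fresh distinct keys, so items append one pair per group
  rw [PySem.Dict.items_foldl_insert_fresh groups.items (fun p => p.1)
    (fun p => (PySem.Str.join " " ((PySem.List.sorted p.2 (fun x => x.1)).map (fun x => x.2)),
      (PySem.List.pyGetD (PySem.List.sorted p.2 (fun x => x.1)) 0 (0, "")).1,
      (PySem.List.pyGetD (PySem.List.sorted p.2 (fun x => x.1)) (-1) (0, "")).1)) PySem.Dict.empty
    (by intro a _; exact PySem.Dict.contains_empty _)
    (by show (groups.items.map (fun p => p.1)).Nodup; exact hnd)]
  -- B's output loop
  set agg := List.foldl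
      (fun d t =>
        if d.contains t.1 = true then
          d.insert t.1 ((d.getD t.1 ("", 0, 0)).1 ++ " " ++ t.2.1, (d.getD t.1 ("", 0, 0)).2.1, t.2.2)
        else d.insert t.1 (t.2.1, t.2.2, t.2.2))
      PySem.Dict.empty (PySem.List.sorted lines fun t => t.2.2) with hagg
  rw [pv_out_items (fun k => agg.getD k ("", 0, 0)) lines PySem.Dict.empty
    (by rw [PySem.Dict.keys_empty]; exact List.nodup_nil)]
  simp only [PySem.Dict.contains_empty, Bool.not_false, List.filter_true]
  rw [hitems, List.map_map, hkeys]
  refine List.map_congr_left ?_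
  intro k hkmem
  have hk : k ∈ lines.map (fun t => t.1) := (PySem.Set.mem_ofList _ _).mp hkmem
  simp only [Function.comp]
  congr 1
  rw [hgetD k, PySem.Dict.getD_eq_get?_getD, hagg, pv_agg_get? k _ PySem.Dict.empty,
    PySem.Dict.get?_empty]
  exact pv_value_eq lines k hk

-- ===== VERDICT (by name: the statement is the Claim_ definition above) =====
theorem by_timestamp_spec : Claim_equal_by_timestamp := by
  intro lines _
  show by_timestamp lines = by_timestamp_alt lines
  exact pv_main_eq lines
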